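-- pv_equiv track=rewrite | github.com/alcytorres/algorithm-patterns | ztest.py | max_difference_sliding_window
-- ===== SOURCE A (Python) =====
-- def max_difference_sliding_window(arr, k):    # arr = [1, 4, 2, 8], k = 2 (window size is 2)
--     # Check if array is too short
--     if len(arr) < k:                         # Is length of arr (4) less than k (2)? No
--         return None                          # If yes, return None (not enough elements)
--
--     # Set up the first window
--     window = arr[:k]                         # Take first k elements: arr[:2] = [1, 4]
--     max_diff = max(window) - min(window)     # Find max(1, 4) = 4, min(1, 4) = 1, so 4 - 1 = 3
--
--     # Slide the window to check other subarrays
--     for i in range(k, len(arr)):             # k = 2, len(arr) = 4, so i goes from 2 to 3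
--                                              # Iteration 1: i = 2
--         window = arr[i - k + 1:i + 1]        # New window: arr[1:3] = [4, 2]
--         current_diff = max(window) - min(window)  # max(4, 2) = 4, min(4, 2) = 2, so 4 - 2 = 2
--         max_diff = max(max_diff, current_diff)    # Compare: max(3, 2) = 3, so max_diff = 3
--                                              # Iteration 2: i = 3
--         window = arr[i - k + 1:i + 1]        # New window: arr[2:4] = [2, 8]
--         current_diff = max(window) - min(window)  # max(2, 8) = 8, min(2, 8) = 2, so 8 - 2 = 6
--         max_diff = max(max_diff, current_diff)    # Compare: max(3, 6) = 6, so max_diff = 6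
--
--     return max_diff                          # Return 6 (largest difference found)
-- ===== SOURCE B (Python) =====
-- def max_difference_sliding_window(arr, k):
--     # O(n) monotonic-deque sliding-window max/min (A rescans each window: O(n*k)).
--     n = len(arr)
--     if n < k:
--         return None
--     maxq = []  # (index, value), values strictly decreasing front->back
--     minq = []  # (index, value), values strictly increasing front->back
--     best = None
--     for i, x in enumerate(arr):
--         while maxq and maxq[-1][1] <= x:
--             maxq.pop()
--         maxq.append((i, x))
--         while minq and minq[-1][1] >= x:
--             minq.pop()
--         minq.append((i, x))
--         while maxq[0][0] <= i - k:
--             maxq.pop(0)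
--         while minq[0][0] <= i - k:
--             minq.pop(0)
--         if i >= k - 1:
--             d = maxq[0][1] - minq[0][1]
--             if best is None or d > best:
--                 best = d
--     return best
-- ===== Notes on version B (the rewrite author's own statement) =====
-- stated objective: faster
-- what changed: A recomputes max and min of every length-k slice (O(n*k)); B makes one pass with two monotonic deques (sliding-window maximum/minimum), O(n).
import Mathlib
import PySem

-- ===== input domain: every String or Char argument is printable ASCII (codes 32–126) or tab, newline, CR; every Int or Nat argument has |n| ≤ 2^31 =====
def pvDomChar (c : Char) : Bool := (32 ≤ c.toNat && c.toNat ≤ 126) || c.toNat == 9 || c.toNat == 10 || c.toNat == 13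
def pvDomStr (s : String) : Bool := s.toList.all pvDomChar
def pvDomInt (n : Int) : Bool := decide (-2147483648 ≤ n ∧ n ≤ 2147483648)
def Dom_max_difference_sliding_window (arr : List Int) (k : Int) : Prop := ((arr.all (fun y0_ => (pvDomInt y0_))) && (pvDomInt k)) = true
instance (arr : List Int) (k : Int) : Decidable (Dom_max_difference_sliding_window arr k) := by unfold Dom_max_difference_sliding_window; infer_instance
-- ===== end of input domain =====

-- B replaces A's per-window rescans (max/min of each slice, O(n*k)) by one pass with two
-- monotonic deques (sliding-window maximum/minimum), O(n); equivalence of return values proved for k ≥ 1.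

-- ===== PORT A =====
def pvABody (arr : List Int) (k : Int) (acc : Option Int) (i : Int) : Option Int :=
  match acc with
  | none => none
  | some md =>
    let w := PySem.List.slice arr (some (i - k + 1)) (some (i + 1))
    match PySem.List.max? w (fun y => y), PySem.List.min? w (fun y => y) with
    | some M, some m => some (max md (M - m))
    | _, _ => none

def max_difference_sliding_window (arr : List Int) (k : Int) : Option Int :=
  if (arr.length : Int) < k then none
  else
    let window := PySem.List.slice arr none (some k)
    match PySem.List.max? window (fun y => y), PySem.List.min? window (fun y => y) with
    | some M, some m =>
        (PySem.List.pyRange k (arr.length : Int) 1).foldl (pvABody arr k) (some (M - m))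
    | _, _ => none

-- ===== PORT B =====
-- 'while q and p(q[-1]): q.pop()' — pop from the back while the predicate holds
def pvPopBack (p : Int × Int → Bool) : List (Int × Int) → List (Int × Int)
  | [] => []
  | [a] => if p a then [] else [a]
  | a :: b :: rest =>
    match pvPopBack p (b :: rest) with
    | [] => if p a then [] else [a]
    | r => a :: r

-- the body of B's single loop over enumerate(arr)
def pvBBody (k : Int) (st : List (Int × Int) × List (Int × Int) × Option Int)
    (ix : Int × Int) : List (Int × Int) × List (Int × Int) × Option Int :=
  let i := ix.1
  let x := ix.2
  let mq := (pvPopBack (fun e => decide (e.2 ≤ x)) st.1 ++ [(i, x)]).dropWhile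
      (fun e => decide (e.1 ≤ i - k))
  let nq := (pvPopBack (fun e => decide (x ≤ e.2)) st.2.1 ++ [(i, x)]).dropWhile
      (fun e => decide (e.1 ≤ i - k))
  let best :=
    if k - 1 ≤ i then
      let d := (mq.headD (0, 0)).2 - (nq.headD (0, 0)).2
      match st.2.2 with
      | none => some d
      | some b => if d > b then some d else some b
    else st.2.2
  (mq, nq, best)

def max_difference_sliding_window_alt (arr : List Int) (k : Int) : Option Int :=
  if (arr.length : Int) < k then none
  else ((PySem.List.enumerate arr 0).foldl (pvBBody k) ([], [], none)).2.2

-- ===== PRECONDITION & SPEC =====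
-- Pre_ excludes k ≤ 0, on which Python A raises ValueError ('max() of empty sequence').
def Pre_max_difference_sliding_window (arr : List Int) (k : Int) : Prop := 1 ≤ k
instance (arr : List Int) (k : Int) : Decidable (Pre_max_difference_sliding_window arr k) := by
  unfold Pre_max_difference_sliding_window; infer_instance
def pvWitness_max_difference_sliding_window : List Int × Int := ([1, 4, 2, 8], 2)


def Spec_max_difference_sliding_window (arr : List Int) (k : Int) (out : Option Int) : Prop :=
  out = max_difference_sliding_window_alt arr k
instance (arr : List Int) (k : Int) (out : Option Int) :
    Decidable (Spec_max_difference_sliding_window arr k out) := by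
  unfold Spec_max_difference_sliding_window; infer_instance

-- ===== CLAIM (what is proved, stated in full; the proofs are below) =====
def Claim_equal_max_difference_sliding_window : Prop := ∀ (arr : List Int) (k : Int), Dom_max_difference_sliding_window arr k → Pre_max_difference_sliding_window arr k → Spec_max_difference_sliding_window arr k (max_difference_sliding_window arr k)

-- ===== LEMMAS AND PROOFS =====

def pvSpread : List Int → Int
  | [] => 0
  | v :: vs => vs.foldl max v - vs.foldl min v

def pvBest (arr : List Int) (kn : Nat) : Nat → Int
  | 0 => pvSpread (arr.take kn)
  | j + 1 => max (pvBest arr kn j) (pvSpread ((arr.drop (j + 1)).take kn))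

def pvSMax (keep : Int → Int → Bool) : List (Int × Int) → List (Int × Int)
  | [] => []
  | a :: rest => if rest.all (fun b => keep a.2 b.2) then a :: pvSMax keep rest else pvSMax keep rest

def pvKeepMax (u v : Int) : Bool := decide (v < u)

def pvKeepMin (u v : Int) : Bool := decide (u < v)

def pvWin (arr : List Int) (kn t : Nat) : List (Int × Int) :=
  PySem.List.enumerate ((arr.take t).drop (t - kn)) ((t - kn : Nat) : Int)

theorem pvSMax_subset (keep : Int → Int → Bool) (W : List (Int × Int)) :
    ∀ e ∈ pvSMax keep W, e ∈ W := by
  induction W with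
  | nil => simp [pvSMax]
  | cons a rest ih =>
    intro e he
    simp only [pvSMax] at he
    split at he
    · rcases List.mem_cons.1 he with h | h
      · simp [h]
      · exact List.mem_cons_of_mem _ (ih e h)
    · exact List.mem_cons_of_mem _ (ih e he)

theorem pvSMax_pairwise (keep : Int → Int → Bool) (W : List (Int × Int)) :
    (pvSMax keep W).Pairwise (fun a b => keep a.2 b.2 = true) := by
  induction W with
  | nil => simp [pvSMax]
  | cons a rest ih =>
    simp only [pvSMax]
    split
    · rename_i hall
      refine List.pairwise_cons.2 ⟨?_, ih⟩
      intro b hb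
      exact (List.all_eq_true.1 hall) b (pvSMax_subset keep rest b hb)
    · exact ih

theorem pvPopBack_filter (p : Int × Int → Bool) (q : List (Int × Int))
    (h : q.Pairwise (fun a b => p a = true → p b = true)) :
    pvPopBack p q = q.filter (fun e => !p e) := by
  induction q with
  | nil => simp [pvPopBack]
  | cons a rest ih =>
    rcases List.pairwise_cons.1 h with ⟨ha, hrest⟩
    cases rest with
    | nil => by_cases hp : p a <;> simp [pvPopBack, hp]
    | cons b rest' =>
      have ihr := ih hrest
      simp only [pvPopBack, ihr]
      by_cases hp : p a
      · have : ∀ e ∈ b :: rest', p e = true := fun e he => ha e he hp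
        have hfilt : (b :: rest').filter (fun e => !p e) = [] := by
          rw [List.filter_eq_nil_iff]
          intro e he
          simp [this e he]
        simp [hfilt, hp]
      · by_cases hf : (b :: rest').filter (fun e => !p e) = []
        · simp [hf, hp]
        · have hstep : List.filter (fun e => !p e) (a :: b :: rest')
              = a :: List.filter (fun e => !p e) (b :: rest') := by
            simp [List.filter_cons, hp]
          rw [hstep]
          cases hxx : (b :: rest').filter (fun e => !p e) with
          | nil => exact absurd hxx hf
          | cons u v => rfl

theorem pvSMax_append (keep : Int → Int → Bool) (P : List (Int × Int)) (i x : Int) :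
    pvSMax keep (P ++ [(i, x)]) = (pvSMax keep P).filter (fun a => keep a.2 x) ++ [(i, x)] := by
  induction P with
  | nil => simp [pvSMax]
  | cons a P' ih =>
    simp only [List.cons_append, pvSMax, List.all_append, List.all_cons, List.all_nil,
      Bool.and_true, ih]
    by_cases h1 : P'.all (fun b => keep a.2 b.2) <;> by_cases h2 : keep a.2 x <;>
      simp [h1, h2, List.filter_cons]

theorem pvSMax_head_max (W : List (Int × Int)) (hW : W ≠ []) :
    ∃ a t, pvSMax pvKeepMax W = a :: t ∧ a ∈ W ∧ ∀ b ∈ W, b.2 ≤ a.2 := by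
  induction W with
  | nil => exact absurd rfl hW
  | cons a rest ih =>
    by_cases hall : rest.all (fun b => pvKeepMax a.2 b.2)
    · refine ⟨a, pvSMax pvKeepMax rest, ?_, by simp, ?_⟩
      · simp [pvSMax, hall]
      · intro b hb
        rcases List.mem_cons.1 hb with h | h
        · simp [h]
        · have := (List.all_eq_true.1 hall) b h
          simp only [pvKeepMax, decide_eq_true_eq] at this
          omega
    · have hrest : rest ≠ [] := by
        intro h; subst h; simp at hall
      rcases ih hrest with ⟨h0, t0, he, hm, hb⟩
      refine ⟨h0, t0, ?_, List.mem_cons_of_mem _ hm, ?_⟩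
      · simp [pvSMax, hall, he]
      · intro b hbm
        rcases List.mem_cons.1 hbm with h | h
        · subst h
          simp only [List.all_eq_true, pvKeepMax, decide_eq_true_eq] at hall
          push_neg at hall
          rcases hall with ⟨c, hc, hc2⟩
          exact le_trans hc2 (hb c hc)
        · exact hb b h

theorem pvSMax_head_min (W : List (Int × Int)) (hW : W ≠ []) :
    ∃ a t, pvSMax pvKeepMin W = a :: t ∧ a ∈ W ∧ ∀ b ∈ W, a.2 ≤ b.2 := by
  induction W with
  | nil => exact absurd rfl hW
  | cons a rest ih =>
    by_cases hall : rest.all (fun b => pvKeepMin a.2 b.2)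
    · refine ⟨a, pvSMax pvKeepMin rest, ?_, by simp, ?_⟩
      · simp [pvSMax, hall]
      · intro b hb
        rcases List.mem_cons.1 hb with h | h
        · simp [h]
        · have := (List.all_eq_true.1 hall) b h
          simp only [pvKeepMin, decide_eq_true_eq] at this
          omega
    · have hrest : rest ≠ [] := by
        intro h; subst h; simp at hall
      rcases ih hrest with ⟨h0, t0, he, hm, hb⟩
      refine ⟨h0, t0, ?_, List.mem_cons_of_mem _ hm, ?_⟩
      · simp [pvSMax, hall, he]
      · intro b hbm
        rcases List.mem_cons.1 hbm with h | h
        · subst h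
          simp only [List.all_eq_true, pvKeepMin, decide_eq_true_eq] at hall
          push_neg at hall
          rcases hall with ⟨c, hc, hc2⟩
          exact le_trans (hb c hc) hc2
        · exact hb b h

theorem pvDropWhile_all_false {α : Type} (p : α → Bool) (l : List α)
    (h : ∀ e ∈ l, p e = false) : l.dropWhile p = l := by
  cases l with
  | nil => rfl
  | cons a l' => rw [List.dropWhile_cons, h a (by simp)]; simp

theorem pvWin_idx_lb (arr : List Int) (kn t : Nat) (e : Int × Int)
    (he : e ∈ pvWin arr kn t) : ((t - kn : Nat) : Int) ≤ e.1 := by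
  rcases (PySem.List.mem_enumerate_iff _ _ _).1 he with ⟨j, hj, rfl⟩
  simp

theorem pvStep (keep : Int → Int → Bool) (q : Int → Bool) (arr : List Int) (k : Int)
    (hk : 1 ≤ k) (t : Nat) (ht : t < arr.length)
    (h1 : ∀ u : Int, (!q u) = keep u (arr[t]))
    (h2 : ∀ u v : Int, keep u v = true → q u = true → q v = true) :
    ((pvPopBack (fun e => q e.2) (pvSMax keep (pvWin arr k.toNat t)) ++ [((t : Int), arr[t])]).dropWhile
        (fun e => decide (e.1 ≤ (t : Int) - k)))
      = pvSMax keep (pvWin arr k.toNat (t + 1)) := by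
  have hknk : ((k.toNat : Int)) = k := Int.toNat_of_nonneg (by omega)
  -- 1. pop-back = filter
  have hpair : (pvSMax keep (pvWin arr k.toNat t)).Pairwise
      (fun a b => (fun e => q e.2) a = true → (fun e => q e.2) b = true) := by
    have := pvSMax_pairwise keep (pvWin arr k.toNat t)
    exact this.imp (fun hab hqa => h2 _ _ hab hqa)
  rw [pvPopBack_filter _ _ hpair]
  have hfun : (fun e : Int × Int => !(fun e : Int × Int => q e.2) e)
      = (fun e : Int × Int => keep e.2 arr[t]) := by
    funext e; exact h1 e.2
  rw [hfun, ← pvSMax_append]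
  -- 2. the appended window is the (t+1)-prefix window with the old left bound
  have hlen : ((arr.take t).drop (t - k.toNat)).length = t - (t - k.toNat) := by
    simp [List.length_drop, List.length_take]
    omega
  have happ : pvWin arr k.toNat t ++ [((t : Int), arr[t])]
      = PySem.List.enumerate ((arr.take (t + 1)).drop (t - k.toNat)) ((t - k.toNat : Nat) : Int) := by
    have htake : arr.take (t + 1) = arr.take t ++ [arr[t]] := by
      rw [List.take_succ]
      simp [List.getElem?_eq_getElem ht]
    rw [htake, List.drop_append_of_le_length (by simp; omega)]
    rw [PySem.List.enumerate_append]
    unfold pvWin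
    simp only [PySem.List.enumerate_cons, PySem.List.enumerate_nil, hlen]
    simp only [List.append_cancel_left_eq, List.cons.injEq, Prod.mk.injEq, and_true]
    omega
  rw [happ]
  -- 3. expiry
  by_cases hcase : t + 1 ≤ k.toNat
  · -- window does not slide: nothing expires
    have h0 : t - k.toNat = 0 := by omega
    have h0' : (t + 1) - k.toNat = 0 := by omega
    have : pvWin arr k.toNat (t + 1)
        = PySem.List.enumerate ((arr.take (t + 1)).drop (t - k.toNat)) ((t - k.toNat : Nat) : Int) := by
      unfold pvWin; rw [h0, h0']
    rw [← this]
    apply pvDropWhile_all_false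
    intro e he
    have := pvWin_idx_lb arr k.toNat (t + 1) e (pvSMax_subset _ _ e he)
    rw [h0'] at this
    simp only [decide_eq_false_iff_not, not_le]
    push_cast at this ⊢
    omega
  · -- window slides by one: the front entry (if present) expires
    have hlo : t - k.toNat < (arr.take (t + 1)).length := by
      simp [List.length_take]; omega
    have hdrop : (arr.take (t + 1)).drop (t - k.toNat)
        = (arr.take (t + 1))[t - k.toNat] :: (arr.take (t + 1)).drop ((t - k.toNat) + 1) := by
      exact List.drop_eq_getElem_cons hlo
    have hwin' : PySem.List.enumerate ((arr.take (t + 1)).drop ((t - k.toNat) + 1)) (((t - k.toNat : Nat) : Int) + 1)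
        = pvWin arr k.toNat (t + 1) := by
      unfold pvWin
      have hsub : (t + 1) - k.toNat = (t - k.toNat) + 1 := by omega
      rw [hsub]
      push_cast
      rfl
    have hide : ∀ e ∈ pvSMax keep (pvWin arr k.toNat (t + 1)),
        (fun e : Int × Int => decide (e.1 ≤ (t : Int) - k)) e = false := by
      intro e he
      have := pvWin_idx_lb arr k.toNat (t + 1) e (pvSMax_subset _ _ e he)
      simp only [decide_eq_false_iff_not, not_le]
      have hc : (((t + 1) - k.toNat : Nat) : Int) = (t : Int) + 1 - k := by push_cast; omega
      omega
    rw [hdrop, PySem.List.enumerate_cons, hwin']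
    simp only [pvSMax]
    have hfront : decide (((t - k.toNat : Nat) : Int) ≤ (t : Int) - k) = true := by
      simp only [decide_eq_true_eq]
      push_cast
      omega
    split
    · rw [List.dropWhile_cons]
      dsimp only
      rw [hfront]
      simp only [if_true]
      exact pvDropWhile_all_false _ _ hide
    · exact pvDropWhile_all_false _ _ hide

theorem pvFoldlMaxEq (v : Int) (vs : List Int) (m : Int) (hm : m ∈ v :: vs)
    (hub : ∀ y ∈ v :: vs, y ≤ m) : vs.foldl max v = m := by
  have h1 := PySem.List.le_foldl_max vs v
  have h2 := PySem.List.foldl_max_mem vs v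
  have hle : m ≤ vs.foldl max v := by
    rcases List.mem_cons.1 hm with h | h
    · subst h; exact h1.1
    · exact h1.2 m h
  have hge : vs.foldl max v ≤ m := by
    rcases h2 with h | h
    · rw [h]; exact hub v (by simp)
    · exact hub _ (List.mem_cons_of_mem _ h)
  omega

theorem pvFoldlMinEq (v : Int) (vs : List Int) (m : Int) (hm : m ∈ v :: vs)
    (hub : ∀ y ∈ v :: vs, m ≤ y) : vs.foldl min v = m := by
  have h1 := PySem.List.foldl_min_le vs v
  have h2 := PySem.List.foldl_min_mem vs v
  have hle : vs.foldl min v ≤ m := by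
    rcases List.mem_cons.1 hm with h | h
    · subst h; exact h1.1
    · exact h1.2 m h
  have hge : m ≤ vs.foldl min v := by
    rcases h2 with h | h
    · rw [h]; exact hub v (by simp)
    · exact hub _ (List.mem_cons_of_mem _ h)
  omega

theorem pvHeads (W : List (Int × Int)) (l : List Int)
    (hsnd : W.map Prod.snd = l) (hne : W ≠ []) :
    ((pvSMax pvKeepMax W).headD (0, 0)).2 - ((pvSMax pvKeepMin W).headD (0, 0)).2
      = pvSpread l := by
  rcases pvSMax_head_max W hne with ⟨a, ta, hea, hma, hba⟩
  rcases pvSMax_head_min W hne with ⟨b, tb, heb, hmb, hbb⟩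
  cases l with
  | nil => simp at hsnd; exact absurd hsnd hne
  | cons v vs =>
    rw [hea, heb]
    simp only [List.headD_cons, pvSpread]
    have hmax : vs.foldl max v = a.2 := by
      apply pvFoldlMaxEq
      · rw [← hsnd]; exact List.mem_map_of_mem hma
      · intro y hy
        rw [← hsnd] at hy
        rcases List.mem_map.1 hy with ⟨c, hc, rfl⟩
        exact hba c hc
    have hmin : vs.foldl min v = b.2 := by
      apply pvFoldlMinEq
      · rw [← hsnd]; exact List.mem_map_of_mem hmb
      · intro y hy
        rw [← hsnd] at hy
        rcases List.mem_map.1 hy with ⟨c, hc, rfl⟩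
        exact hbb c hc
    omega

theorem pvBInv (arr : List Int) (k : Int) (hk : 1 ≤ k) (t : Nat) (ht : t ≤ arr.length) :
    (PySem.List.enumerate (arr.take t) 0).foldl (pvBBody k) ([], [], none)
      = (pvSMax pvKeepMax (pvWin arr k.toNat t), pvSMax pvKeepMin (pvWin arr k.toNat t),
         if t < k.toNat then none else some (pvBest arr k.toNat (t - k.toNat))) := by
  induction t with
  | zero =>
    have h0 : 0 < k.toNat := by omega
    simp [pvWin, pvSMax, PySem.List.enumerate_nil, h0]
  | succ t ih =>
    have ht' : t < arr.length := by omega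
    have hsplit : PySem.List.enumerate (arr.take (t + 1)) 0
        = PySem.List.enumerate (arr.take t) 0 ++ [((t : Int), arr[t])] := by
      have htake : arr.take (t + 1) = arr.take t ++ [arr[t]] := by
        rw [List.take_add_one]
        simp [List.getElem?_eq_getElem ht']
      rw [htake, PySem.List.enumerate_append]
      simp [PySem.List.enumerate_cons, PySem.List.enumerate_nil, min_eq_left (le_of_lt ht')]
    rw [hsplit, List.foldl_append, ih (le_of_lt ht')]
    simp only [List.foldl_cons, List.foldl_nil]
    simp only [pvBBody]
    have hmax : (List.dropWhile (fun e : Int × Int => decide (e.1 ≤ (t : Int) - k))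
        (pvPopBack (fun e : Int × Int => decide (e.2 ≤ arr[t])) (pvSMax pvKeepMax (pvWin arr k.toNat t))
          ++ [((t : Int), arr[t])]))
        = pvSMax pvKeepMax (pvWin arr k.toNat (t + 1)) := by
      apply pvStep pvKeepMax (fun u => decide (u ≤ arr[t])) arr k hk t ht'
      · intro u
        simp only [pvKeepMax, ← decide_not]
        simp [not_le]
      · intro u v h1 h2
        simp only [pvKeepMax, decide_eq_true_eq] at *
        omega
    have hmin : (List.dropWhile (fun e : Int × Int => decide (e.1 ≤ (t : Int) - k))
        (pvPopBack (fun e : Int × Int => decide (arr[t] ≤ e.2)) (pvSMax pvKeepMin (pvWin arr k.toNat t))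
          ++ [((t : Int), arr[t])]))
        = pvSMax pvKeepMin (pvWin arr k.toNat (t + 1)) := by
      apply pvStep pvKeepMin (fun u => decide (arr[t] ≤ u)) arr k hk t ht'
      · intro u
        simp only [pvKeepMin, ← decide_not]
        simp [not_le]
      · intro u v h1 h2
        simp only [pvKeepMin, decide_eq_true_eq] at *
        omega
    rw [hmax, hmin]
    simp only [Prod.mk.injEq, true_and]
    -- the best accumulator
    have hknk : ((k.toNat : Int)) = k := Int.toNat_of_nonneg (by omega)
    have hwl : ((arr.take (t + 1)).drop ((t + 1) - k.toNat)) ≠ [] := by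
      simp only [ne_eq, List.drop_eq_nil_iff, List.length_take]
      omega
    have hne : pvWin arr k.toNat (t + 1) ≠ [] := by
      unfold pvWin
      intro h
      have := congrArg List.length h
      rw [PySem.List.length_enumerate] at this
      simp [List.length_take] at this
      omega
    have hd := pvHeads (pvWin arr k.toNat (t + 1)) ((arr.take (t + 1)).drop ((t + 1) - k.toNat))
        (PySem.List.map_snd_enumerate _ _) hne
    rw [hd]
    by_cases hc1 : t + 1 < k.toNat
    · have hcond : ¬ (k - 1 ≤ (t : Int)) := by omega
      have ht1 : t < k.toNat := by omega
      simp [hcond, ht1, hc1]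
    · have hcond : k - 1 ≤ (t : Int) := by omega
      rw [if_pos hcond, if_neg hc1]
      have hwin_eq : (arr.take (t + 1)).drop ((t + 1) - k.toNat)
          = (arr.drop ((t + 1) - k.toNat)).take k.toNat := by
        rw [List.drop_take]
        congr 1
        omega
      by_cases ht1 : t < k.toNat
      · -- first full window: t + 1 = k.toNat
        have h0 : (t + 1) - k.toNat = 0 := by omega
        have hkt : k.toNat = t + 1 := by omega
        rw [if_pos ht1]
        simp only [h0, pvBest, List.drop_zero]
        rw [hkt]
      · -- sliding window: take the max with the previous best
        rw [if_neg ht1]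
        have hsub : (t + 1) - k.toNat = (t - k.toNat) + 1 := by omega
        have hbest : pvBest arr k.toNat ((t + 1) - k.toNat)
            = max (pvBest arr k.toNat (t - k.toNat))
                (pvSpread ((arr.drop ((t + 1) - k.toNat)).take k.toNat)) := by
          rw [hsub]
          simp [pvBest, ← hsub]
        rw [hwin_eq, hbest]
        dsimp only
        split_ifs with h
        · simp [max_eq_right (le_of_lt h)]
        · simp [max_eq_left (by omega : pvSpread ((arr.drop ((t + 1) - k.toNat)).take k.toNat) ≤ pvBest arr k.toNat (t - k.toNat))]

theorem pvAFold (arr : List Int) (k : Int) (hk : 1 ≤ k) (m : Nat)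
    (hm : k.toNat ≤ m) (hmn : m ≤ arr.length) :
    (PySem.List.pyRange k (m : Int) 1).foldl (pvABody arr k) (some (pvSpread (arr.take k.toNat)))
      = some (pvBest arr k.toNat (m - k.toNat)) := by
  have hknk : ((k.toNat : Int)) = k := Int.toNat_of_nonneg (by omega)
  induction m, hm using Nat.le_induction with
  | base =>
    rw [PySem.List.pyRange_one_eq_nil (by omega)]
    simp [pvBest]
  | succ m hm ih =>
    have hmn' : m ≤ arr.length := by omega
    have hcast : ((m + 1 : Nat) : Int) = (m : Int) + 1 := by push_cast; ring
    rw [hcast, PySem.List.pyRange_one_succ_right (by omega), List.foldl_append, ih hmn']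
    simp only [List.foldl_cons, List.foldl_nil, pvABody]
    have hslice : PySem.List.slice arr (some ((m : Int) - k + 1)) (some ((m : Int) + 1))
        = (arr.drop ((m + 1) - k.toNat)).take k.toNat := by
      rw [PySem.List.slice_toNat arr (by omega) (by omega)]
      have e1 : ((m : Int) + 1).toNat - ((m : Int) - k + 1).toNat = k.toNat := by omega
      have e2 : ((m : Int) - k + 1).toNat = (m + 1) - k.toNat := by omega
      rw [e1, e2]
    rw [hslice]
    have hj : (m + 1) - k.toNat < arr.length := by omega
    have hne : (arr.drop ((m + 1) - k.toNat)).take k.toNat ≠ [] := by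
      simp only [ne_eq, List.take_eq_nil_iff, List.drop_eq_nil_iff]
      omega
    obtain ⟨v, vs, hvs⟩ := List.exists_cons_of_ne_nil hne
    rw [hvs, PySem.List.max?_id_cons, PySem.List.min?_id_cons]
    have hsp : vs.foldl max v - vs.foldl min v = pvSpread ((arr.drop ((m + 1) - k.toNat)).take k.toNat) := by
      rw [hvs]; rfl
    have hsub : (m + 1) - k.toNat = (m - k.toNat) + 1 := by omega
    have hbest : pvBest arr k.toNat ((m + 1) - k.toNat)
        = max (pvBest arr k.toNat (m - k.toNat))
            (pvSpread ((arr.drop ((m + 1) - k.toNat)).take k.toNat)) := by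
      rw [hsub]
      simp [pvBest, ← hsub]
    rw [hbest, ← hsp]

theorem pvFinal (arr : List Int) (k : Int) (hk : 1 ≤ k) :
    max_difference_sliding_window arr k = max_difference_sliding_window_alt arr k := by
  unfold max_difference_sliding_window max_difference_sliding_window_alt
  by_cases hlen : (arr.length : Int) < k
  · rw [if_pos hlen, if_pos hlen]
  · rw [if_neg hlen, if_neg hlen]
    have hknk : ((k.toNat : Int)) = k := Int.toNat_of_nonneg (by omega)
    have hwindow : PySem.List.slice arr none (some k) = arr.take k.toNat :=
      PySem.List.slice_to arr (by omega)
    have hne : arr.take k.toNat ≠ [] := by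
      intro h
      have := congrArg List.length h
      simp only [List.length_take, List.length_nil] at this
      omega
    obtain ⟨v, vs, hvs⟩ := List.exists_cons_of_ne_nil hne
    simp only [hwindow, hvs, PySem.List.max?_id_cons, PySem.List.min?_id_cons]
    have hsp : vs.foldl max v - vs.foldl min v = pvSpread (arr.take k.toNat) := by
      rw [hvs]; rfl
    rw [hsp, pvAFold arr k hk arr.length (by omega) le_rfl]
    have hb := pvBInv arr k hk arr.length le_rfl
    rw [List.take_length] at hb
    rw [hb]
    have : ¬ (arr.length < k.toNat) := by omega
    simp [this]

-- ===== VERDICT (by name: the statement is the Claim_ definition above) =====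
theorem max_difference_sliding_window_spec : Claim_equal_max_difference_sliding_window := by
  intro arr k _ hpre
  unfold Pre_max_difference_sliding_window at hpre
  unfold Spec_max_difference_sliding_window
  exact pvFinal arr k hpre
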